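-- pv_equiv track=rewrite | github.com/AsherNederveld/2predmech_2project | nmplus.py | get_dynamic_benchmarks
-- ===== SOURCE A (Python) =====
-- def get_dynamic_benchmarks(prefixes, all_files):
--     benchmarks = set()
--     for filename in all_files:
--         if not filename.endswith('.out'): continue
--         for prefix in prefixes:
--             if filename.startswith(prefix):
--                 bench_name = filename[len(prefix):-4].lstrip('_').lstrip('-')
--                 if bench_name: benchmarks.add(bench_name)
--     return sorted(list(benchmarks))
-- ===== SOURCE B (Python) =====
-- def get_dynamic_benchmarks(prefixes, all_files):
--     # Instead of scanning the whole prefix list for every file, hash the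
--     # prefixes once and walk each '.out' file's stem, testing each of its
--     # proper prefixes against the set.  Matches with len(prefix) >= len(stem)
--     # can never produce a non-empty benchmark name, so they need no check.
--     pset = set(prefixes)
--     found = set()
--     for f in all_files:
--         if not f.endswith('.out'):
--             continue
--         stem = f[:-4]
--         for L in range(len(stem)):
--             if stem[:L] in pset:
--                 name = stem[L:].lstrip('_').lstrip('-')
--                 if name:
--                     found.add(name)
--     return sorted(found)
-- ===== Notes on version B (the rewrite author's own statement) =====
-- stated objective: alternative
-- what changed: B hashes the prefixes into a set once and, for each '.out' file, probes every proper prefix of its stem against that set (matches at or past the stem end can never yield a non-empty name), instead of A's scan of the whole prefix list for every file.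
import Mathlib
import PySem

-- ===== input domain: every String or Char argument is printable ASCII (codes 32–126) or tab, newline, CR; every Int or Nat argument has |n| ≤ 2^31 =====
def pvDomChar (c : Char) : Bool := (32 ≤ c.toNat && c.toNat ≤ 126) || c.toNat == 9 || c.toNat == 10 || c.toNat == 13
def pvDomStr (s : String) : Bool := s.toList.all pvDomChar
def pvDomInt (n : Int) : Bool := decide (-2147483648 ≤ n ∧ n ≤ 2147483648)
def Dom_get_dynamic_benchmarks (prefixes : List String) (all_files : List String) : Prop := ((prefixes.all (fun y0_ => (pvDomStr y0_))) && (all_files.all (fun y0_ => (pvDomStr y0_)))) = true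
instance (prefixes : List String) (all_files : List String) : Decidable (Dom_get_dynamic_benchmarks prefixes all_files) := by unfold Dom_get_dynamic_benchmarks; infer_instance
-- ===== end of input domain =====

-- B replaces A's per-file scan of the whole prefix list by a prefix set probed
-- with each stem's proper prefixes (objective: alternative; same return value).

-- ===== PORT A =====
-- exact port of .lstrip('_').lstrip('-') (single-character strip sets)
def pvLstrip2 (cs : List Char) : List Char :=
  (cs.dropWhile (· == '_')).dropWhile (· == '-')

-- bench_name = filename[len(prefix):-4].lstrip('_').lstrip('-')
def pvNameA (filename pfx : String) : String :=
  String.ofList (pvLstrip2 (PySem.List.slice filename.toList (some (PySem.Str.len pfx)) (some (-4))))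

def get_dynamic_benchmarks (prefixes : List String) (all_files : List String) : List String :=
  let benchmarks : PySem.Set String :=
    all_files.foldl (fun bs filename =>
      if PySem.Str.endswith filename ".out" = false then bs
      else prefixes.foldl (fun bs pfx =>
        if PySem.Str.startswith filename pfx then
          let bench_name := pvNameA filename pfx
          if bench_name ≠ "" then PySem.Set.add bs bench_name else bs
        else bs) bs) PySem.Set.empty
  PySem.List.sorted benchmarks (fun x => x) false

-- ===== PORT B =====
-- name = stem[L:].lstrip('_').lstrip('-')
def pvNameB (stem : List Char) (L : Int) : String :=
  String.ofList (pvLstrip2 (PySem.List.slice stem (some L) none))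

def get_dynamic_benchmarks_alt (prefixes : List String) (all_files : List String) : List String :=
  let pset : PySem.Set String := PySem.Set.ofList prefixes
  let found : PySem.Set String :=
    all_files.foldl (fun fs f =>
      if PySem.Str.endswith f ".out" = false then fs
      else
        let stem : List Char := PySem.List.slice f.toList none (some (-4))
        (PySem.List.pyRange 0 (stem.length : Int)).foldl (fun fs L =>
          if PySem.Set.contains pset (String.ofList (PySem.List.slice stem none (some L))) then
            let name := pvNameB stem L
            if name ≠ "" then PySem.Set.add fs name else fs
          else fs) fs) PySem.Set.empty
  PySem.List.sorted found (fun x => x) false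

-- ===== PRECONDITION & SPEC =====
def Spec_get_dynamic_benchmarks (prefixes : List String) (all_files : List String) (out : List String) : Prop := out = get_dynamic_benchmarks_alt prefixes all_files
instance (prefixes : List String) (all_files : List String) (out : List String) : Decidable (Spec_get_dynamic_benchmarks prefixes all_files out) := by unfold Spec_get_dynamic_benchmarks; infer_instance

-- ===== CLAIM (what is proved, stated in full; the proofs are below) =====
def Claim_equal_get_dynamic_benchmarks : Prop := ∀ (prefixes : List String) (all_files : List String), Dom_get_dynamic_benchmarks prefixes all_files → Spec_get_dynamic_benchmarks prefixes all_files (get_dynamic_benchmarks prefixes all_files)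

-- ===== LEMMAS AND PROOFS =====

theorem pv_mem_foldl {α β : Type} (step : List α → β → List α) (G : β → α → Prop)
    (h : ∀ s f y, y ∈ step s f ↔ y ∈ s ∨ G f y) :
    ∀ (files : List β) (s : List α) (y : α),
      y ∈ files.foldl step s ↔ y ∈ s ∨ ∃ f ∈ files, G f y := by
  intro files
  induction files with
  | nil => simp
  | cons f fs ih =>
    intro s y
    rw [List.foldl_cons, ih, h]
    constructor
    · rintro (hs | hG)
      · rcases hs with hs | hG
        · exact Or.inl hs
        · exact Or.inr ⟨f, by simp, hG⟩
      · rcases hG with ⟨g, hg, hGy⟩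
        exact Or.inr ⟨g, by simp [hg], hGy⟩
    · rintro (hs | ⟨g, hg, hGy⟩)
      · exact Or.inl (Or.inl hs)
      · rcases List.mem_cons.mp hg with rfl | hg
        · exact Or.inl (Or.inr hGy)
        · exact Or.inr ⟨g, hg, hGy⟩

theorem pv_nodup_foldl {α β : Type} (step : List α → β → List α)
    (h : ∀ s f, s.Nodup → (step s f).Nodup) :
    ∀ (files : List β) (s : List α), s.Nodup → (files.foldl step s).Nodup := by
  intro files
  induction files with
  | nil => intro s hs; simpa
  | cons f fs ih => intro s hs; exact ih _ (h _ _ hs)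

theorem pv_sliceA (cs : List Char) (m : Nat) :
    PySem.List.slice cs (some (m : Int)) (some (-4)) = (cs.take (cs.length - 4)).drop m := by
  simp [PySem.List.slice, PySem.List.clampIdx_neg_ofNat cs.length 4 (by omega)]
  rw [List.drop_take]
  by_cases h : m ≤ cs.length
  · rw [min_eq_left h]
  · have h1 : List.drop m cs = [] := List.drop_eq_nil_iff.mpr (by omega)
    rw [min_eq_right (by omega), List.drop_length, h1]
    simp

theorem pv_bridge (prefixes : List String) (f : String) (y : String) :
    (∃ p ∈ prefixes, PySem.Str.startswith f p = true ∧ pvNameA f p ≠ "" ∧ y = pvNameA f p)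
    ↔ (∃ L : Int, (0 ≤ L ∧ L < ((f.toList.take (f.toList.length - 4)).length : Int)) ∧
        String.ofList ((f.toList.take (f.toList.length - 4)).take L.toNat) ∈ prefixes ∧
        pvNameB (f.toList.take (f.toList.length - 4)) L ≠ "" ∧
        y = pvNameB (f.toList.take (f.toList.length - 4)) L) := by
  set cs := f.toList with hcs
  set stem := cs.take (cs.length - 4) with hstem
  have hstemlen : stem.length = cs.length - 4 := by simp [hstem]
  constructor
  · rintro ⟨p, hp, hsw, hne, rfl⟩
    set m := p.toList.length with hm
    have hpre : p.toList <+: cs := by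
      rw [PySem.Str.startswith_eq] at hsw
      exact (PySem.Chars.startswith_iff _ _).mp hsw
    have htake : cs.take m = p.toList := (List.prefix_iff_eq_take.mp hpre).symm
    have hmn : m ≤ cs.length := by
      have := hpre.length_le; simpa [hm] using this
    have hNA : pvNameA f p = String.ofList (pvLstrip2 (stem.drop m)) := by
      rw [pvNameA, PySem.Str.len_eq, pv_sliceA]
    have hmlt : m < stem.length := by
      by_contra hge
      apply hne
      rw [hNA, List.drop_eq_nil_iff.mpr (by omega)]
      rfl
    refine ⟨(m : Int), ⟨by positivity, by exact_mod_cast hmlt⟩, ?_, ?_, ?_⟩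
    · have : stem.take m = p.toList := by
        rw [hstem, List.take_take, min_eq_left (by omega), htake]
      simp [this, hp]
    · rw [pvNameB, PySem.List.slice_from _ (by positivity)]
      simp only [Int.toNat_natCast]
      rw [← hNA]; exact hne
    · rw [hNA, pvNameB, PySem.List.slice_from _ (by positivity)]
      simp
  · rintro ⟨L, ⟨h0, hlt⟩, hmem, hne, rfl⟩
    set m := L.toNat with hm
    have hLm : L = (m : Int) := by omega
    have hmlt : m < stem.length := by omega
    set p := String.ofList (stem.take m) with hp
    have hptl : p.toList = stem.take m := by simp [hp]
    have hplen : p.toList.length = m := by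
      rw [hptl, List.length_take]; omega
    have htakecs : cs.take m = stem.take m := by
      rw [hstem, List.take_take, min_eq_left (by omega)]
    refine ⟨p, hmem, ?_, ?_, ?_⟩
    · rw [PySem.Str.startswith_eq, PySem.Chars.startswith_iff, hptl, ← htakecs, ← hcs]
      exact List.take_prefix _ _
    · rw [pvNameA, PySem.Str.len_eq, hplen, pv_sliceA, ← hstem]
      rw [pvNameB, PySem.List.slice_from _ h0, ← hm] at hne
      exact hne
    · rw [pvNameA, PySem.Str.len_eq, hplen, pv_sliceA, ← hstem,
        pvNameB, PySem.List.slice_from _ h0, ← hm]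

-- membership characterisation of A's accumulated set
theorem pv_memA (prefixes all_files : List String) (y : String) :
    y ∈ all_files.foldl (fun bs filename =>
      if PySem.Str.endswith filename ".out" = false then bs
      else prefixes.foldl (fun bs pfx =>
        if PySem.Str.startswith filename pfx then
          let bench_name := pvNameA filename pfx
          if bench_name ≠ "" then PySem.Set.add bs bench_name else bs
        else bs) bs) PySem.Set.empty
    ↔ ∃ f ∈ all_files, PySem.Str.endswith f ".out" = true ∧
        ∃ p ∈ prefixes, PySem.Str.startswith f p = true ∧ pvNameA f p ≠ "" ∧ y = pvNameA f p := by
  rw [pv_mem_foldl _ (fun f y => PySem.Str.endswith f ".out" = true ∧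
        ∃ p ∈ prefixes, PySem.Str.startswith f p = true ∧ pvNameA f p ≠ "" ∧ y = pvNameA f p)]
  · simp [PySem.Set.empty]
  · intro s f z
    by_cases he : PySem.Str.endswith f ".out"
    · rw [if_neg (by simp at he; simp [he])]
      rw [pv_mem_foldl _ (fun p z => PySem.Str.startswith f p = true ∧ pvNameA f p ≠ "" ∧ z = pvNameA f p)]
      · simp at he; simp [he]
      · intro s' p z'
        by_cases hsw : PySem.Str.startswith f p
        · by_cases hn : pvNameA f p ≠ ""
          · simp at hsw; simp [hsw, hn, PySem.Set.mem_add]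
          · simp at hsw; simp [hsw, hn]
        · simp at hsw; simp [hsw]
    · have hf : PySem.Str.endswith f ".out" = false := by
        cases h' : PySem.Str.endswith f ".out" with
        | false => rfl
        | true => exact absurd h' he
      rw [if_pos hf]
      simp at hf; simp [hf]

-- membership characterisation of B's accumulated set
theorem pv_memB (prefixes all_files : List String) (y : String) :
    y ∈ all_files.foldl (fun fs f =>
      if PySem.Str.endswith f ".out" = false then fs
      else
        let stem : List Char := PySem.List.slice f.toList none (some (-4))
        (PySem.List.pyRange 0 (stem.length : Int)).foldl (fun fs L =>
          if PySem.Set.contains (PySem.Set.ofList prefixes) (String.ofList (PySem.List.slice stem none (some L))) then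
            let name := pvNameB stem L
            if name ≠ "" then PySem.Set.add fs name else fs
          else fs) fs) PySem.Set.empty
    ↔ ∃ f ∈ all_files, PySem.Str.endswith f ".out" = true ∧
        ∃ L ∈ PySem.List.pyRange 0 (((PySem.List.slice f.toList none (some (-4))).length : Int)),
          PySem.Set.contains (PySem.Set.ofList prefixes) (String.ofList (PySem.List.slice (PySem.List.slice f.toList none (some (-4))) none (some L))) = true ∧
          pvNameB (PySem.List.slice f.toList none (some (-4))) L ≠ "" ∧
          y = pvNameB (PySem.List.slice f.toList none (some (-4))) L := by
  rw [pv_mem_foldl _ (fun f y => PySem.Str.endswith f ".out" = true ∧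
        ∃ L ∈ PySem.List.pyRange 0 (((PySem.List.slice f.toList none (some (-4))).length : Int)),
          PySem.Set.contains (PySem.Set.ofList prefixes) (String.ofList (PySem.List.slice (PySem.List.slice f.toList none (some (-4))) none (some L))) = true ∧
          pvNameB (PySem.List.slice f.toList none (some (-4))) L ≠ "" ∧
          y = pvNameB (PySem.List.slice f.toList none (some (-4))) L)]
  · simp [PySem.Set.empty]
  · intro s f z
    by_cases he : PySem.Str.endswith f ".out"
    · rw [if_neg (by simp at he; simp [he])]
      rw [pv_mem_foldl _ (fun L z =>
          PySem.Set.contains (PySem.Set.ofList prefixes) (String.ofList (PySem.List.slice (PySem.List.slice f.toList none (some (-4))) none (some L))) = true ∧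
          pvNameB (PySem.List.slice f.toList none (some (-4))) L ≠ "" ∧
          z = pvNameB (PySem.List.slice f.toList none (some (-4))) L)]
      · simp at he; simp [he]
      · intro s' L z'
        by_cases hc : PySem.Set.contains (PySem.Set.ofList prefixes) (String.ofList (PySem.List.slice (PySem.List.slice f.toList none (some (-4))) none (some L)))
        · by_cases hn : pvNameB (PySem.List.slice f.toList none (some (-4))) L ≠ ""
          · simp at hc; simp [hc, hn, PySem.Set.mem_add]
          · simp at hc; simp [hc, hn]
        · simp at hc; simp [hc]
    · have hf : PySem.Str.endswith f ".out" = false := by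
        cases h' : PySem.Str.endswith f ".out" with
        | false => rfl
        | true => exact absurd h' he
      rw [if_pos hf]
      simp at hf; simp [hf]

theorem pv_perfile (prefixes : List String) (f y : String) :
    (∃ p ∈ prefixes, PySem.Str.startswith f p = true ∧ pvNameA f p ≠ "" ∧ y = pvNameA f p)
    ↔ ∃ L ∈ PySem.List.pyRange 0 (((PySem.List.slice f.toList none (some (-4))).length : Int)),
        PySem.Set.contains (PySem.Set.ofList prefixes) (String.ofList (PySem.List.slice (PySem.List.slice f.toList none (some (-4))) none (some L))) = true ∧
        pvNameB (PySem.List.slice f.toList none (some (-4))) L ≠ "" ∧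
        y = pvNameB (PySem.List.slice f.toList none (some (-4))) L := by
  have hs : PySem.List.slice f.toList none (some (-4)) = f.toList.take (f.toList.length - 4) :=
    PySem.List.slice_to_neg_ofNat _ 4 (by omega)
  rw [hs, pv_bridge]
  constructor
  · rintro ⟨L, ⟨h0, hlt⟩, hmem, hne, rfl⟩
    refine ⟨L, PySem.List.mem_pyRange_one.mpr ⟨h0, hlt⟩, ?_, hne, rfl⟩
    rw [PySem.Set.contains_iff, PySem.Set.mem_ofList, PySem.List.slice_to _ h0]
    exact hmem
  · rintro ⟨L, hL, hc, hne, rfl⟩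
    obtain ⟨h0, hlt⟩ := PySem.List.mem_pyRange_one.mp hL
    rw [PySem.Set.contains_iff, PySem.Set.mem_ofList, PySem.List.slice_to _ h0] at hc
    exact ⟨L, ⟨h0, hlt⟩, hc, hne, rfl⟩

-- A's accumulated set has no duplicates
theorem pv_nodupA (prefixes all_files : List String) :
    (all_files.foldl (fun bs filename =>
      if PySem.Str.endswith filename ".out" = false then bs
      else prefixes.foldl (fun bs pfx =>
        if PySem.Str.startswith filename pfx then
          let bench_name := pvNameA filename pfx
          if bench_name ≠ "" then PySem.Set.add bs bench_name else bs
        else bs) bs) (PySem.Set.empty : PySem.Set String)).Nodup := by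
  apply pv_nodup_foldl
  · intro s f hs
    by_cases he : PySem.Str.endswith f ".out" = false
    · rw [if_pos he]; exact hs
    · rw [if_neg he]
      apply pv_nodup_foldl _ _ prefixes s hs
      intro s' p hs'
      by_cases h1 : PySem.Str.startswith f p = true
      · rw [if_pos h1]
        show (if pvNameA f p ≠ "" then PySem.Set.add s' (pvNameA f p) else s').Nodup
        by_cases h2 : pvNameA f p ≠ ""
        · rw [if_pos h2]; exact PySem.Set.nodup_add _ _ hs'
        · rw [if_neg h2]; exact hs'
      · rw [if_neg h1]; exact hs'
  · exact List.nodup_nil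

-- B's accumulated set has no duplicates
theorem pv_nodupB (prefixes all_files : List String) :
    (all_files.foldl (fun fs f =>
      if PySem.Str.endswith f ".out" = false then fs
      else
        let stem : List Char := PySem.List.slice f.toList none (some (-4))
        (PySem.List.pyRange 0 (stem.length : Int)).foldl (fun fs L =>
          if PySem.Set.contains (PySem.Set.ofList prefixes) (String.ofList (PySem.List.slice stem none (some L))) then
            let name := pvNameB stem L
            if name ≠ "" then PySem.Set.add fs name else fs
          else fs) fs) (PySem.Set.empty : PySem.Set String)).Nodup := by
  apply pv_nodup_foldl
  · intro s f hs
    by_cases he : PySem.Str.endswith f ".out" = false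
    · rw [if_pos he]; exact hs
    · rw [if_neg he]
      apply pv_nodup_foldl _ _ _ s hs
      intro s' L hs'
      by_cases h1 : PySem.Set.contains (PySem.Set.ofList prefixes) (String.ofList (PySem.List.slice (PySem.List.slice f.toList none (some (-4))) none (some L))) = true
      · rw [if_pos h1]
        show (if pvNameB (PySem.List.slice f.toList none (some (-4))) L ≠ "" then PySem.Set.add s' (pvNameB (PySem.List.slice f.toList none (some (-4))) L) else s').Nodup
        by_cases h2 : pvNameB (PySem.List.slice f.toList none (some (-4))) L ≠ ""
        · rw [if_pos h2]; exact PySem.Set.nodup_add _ _ hs'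
        · rw [if_neg h2]; exact hs'
      · rw [if_neg h1]; exact hs'
  · exact List.nodup_nil

-- ===== VERDICT (by name: the statement is the Claim_ definition above) =====
theorem get_dynamic_benchmarks_spec : Claim_equal_get_dynamic_benchmarks := by
  intro prefixes all_files _
  show get_dynamic_benchmarks prefixes all_files = get_dynamic_benchmarks_alt prefixes all_files
  refine (PySem.List.sorted_id_eq_sorted_id_iff_perm _ _).mpr ?_
  refine (List.perm_ext_iff_of_nodup (pv_nodupA prefixes all_files) (pv_nodupB prefixes all_files)).mpr ?_
  intro a
  rw [pv_memA, pv_memB]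
  simp only [pv_perfile]
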